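-- pv_equiv track=rewrite | github.com/shivsharcode/Python-Training | temporary/Hashing/tempstring.py | calculate_max_removals
-- ===== SOURCE A (Python) =====
-- def calculate_max_removals(main_str, substrings, memo):
--     # Check if the result for the current string is already computed
--     if main_str in memo:
--         return memo[main_str]
--
--     max_removals = 0
--
--     # Iterate through each substring in the list
--     for substring in substrings:
--         pos = main_str.find(substring)
--         if pos != -1:
--             # Create a new string by removing the found substring
--             modified_str = main_str[:pos] + main_str[pos + len(substring):]
--             # Recursively calculate the max removals
--             max_removals = max(max_removals, 1 + calculate_max_removals(modified_str, substrings, memo))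
--
--     memo[main_str] = max_removals
--     return max_removals
-- ===== SOURCE B (Python) =====
-- def calculate_max_removals(main_str, substrings, memo):
--     # Bottom-up rewrite: BFS discovers every state A would evaluate, then a single
--     # shortest-first DP pass fills memo. Return value (and memo contents) match A;
--     # memo is mutated like A's, only the dict insertion order may differ.
--     if main_str in memo:
--         return memo[main_str]
--
--     def successors(s):
--         out = []
--         for sub in substrings:
--             p = s.find(sub)
--             if p != -1:
--                 out.append(s[:p] + s[p + len(sub):])
--         return out
--
--     # Phase 1: collect every reachable state that is not pre-memoized (BFS rounds).
--     pending = [main_str]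
--     seen = {main_str}
--     frontier = [main_str]
--     while frontier:
--         nxt = []
--         for s in frontier:
--             for t in successors(s):
--                 if t not in memo and t not in seen:
--                     seen.add(t)
--                     pending.append(t)
--                     nxt.append(t)
--         frontier = nxt
--
--     # Phase 2: evaluate bottom-up, shortest states first (successors are strictly shorter).
--     for s in sorted(pending, key=len):
--         memo[s] = max([0] + [1 + memo[t] for t in successors(s)])
--     return memo[main_str]
-- ===== Notes on version B (the rewrite author's own statement) =====
-- stated objective: alternative
-- what changed: Replaces A's top-down memoized recursion by an explicit two-phase algorithm: a BFS pass that discovers every reachable non-memoized state, then a single shortest-first bottom-up DP pass that fills memo; the return value (and the key/value set written into memo) is identical, only dict insertion order may differ.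
import Mathlib
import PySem

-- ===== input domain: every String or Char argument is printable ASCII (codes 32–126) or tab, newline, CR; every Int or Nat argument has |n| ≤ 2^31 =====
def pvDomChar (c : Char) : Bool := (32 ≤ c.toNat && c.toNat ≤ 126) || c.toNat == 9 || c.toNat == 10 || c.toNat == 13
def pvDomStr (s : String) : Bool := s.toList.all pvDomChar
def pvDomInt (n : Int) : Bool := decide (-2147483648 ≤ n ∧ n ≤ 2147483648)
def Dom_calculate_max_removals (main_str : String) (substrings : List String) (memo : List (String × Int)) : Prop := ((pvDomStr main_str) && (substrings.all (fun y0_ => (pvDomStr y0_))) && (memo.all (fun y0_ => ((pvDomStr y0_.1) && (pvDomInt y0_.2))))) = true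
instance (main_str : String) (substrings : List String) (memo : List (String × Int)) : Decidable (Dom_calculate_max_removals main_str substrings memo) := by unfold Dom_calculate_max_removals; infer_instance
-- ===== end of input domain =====

-- B replaces A's top-down memoized recursion by BFS state discovery plus a shortest-first
-- bottom-up DP pass (objective: alternative algorithm, same return value; both mutate the
-- Python memo dict with the same key/value set, only dict insertion order may differ).

-- ===== PORT A =====
-- A's memoized recursion; fuel = len(main_str)+1 bounds the recursion depth (each removal
-- shortens the string), so fuel never runs out on inputs where the Python returns (Pre_).
def calcA (substrings : List String) : Nat → String → PySem.Dict String Int → Int × PySem.Dict String Int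
  | 0, _, memo => (0, memo)
  | Nat.succ f, main_str, memo =>
    match PySem.Dict.get? memo main_str with
    | some v => (v, memo)
    | none =>
      let st := substrings.foldl (fun (st : Int × PySem.Dict String Int) substring =>
          let pos := PySem.Str.find main_str substring
          if pos ≠ -1 then
            let modified_str := String.ofList (PySem.Chars.slice main_str.toList none (some pos) ++
              PySem.Chars.slice main_str.toList (some (pos + PySem.Str.len substring)) none)
            let r := calcA substrings f modified_str st.2
            (max st.1 (1 + r.1), r.2)
          else st) (0, memo)
      (st.1, PySem.Dict.insert st.2 main_str st.1)

def calculate_max_removals (main_str : String) (substrings : List String) (memo : List (String × Int)) : Int :=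
  (calcA substrings (main_str.toList.length + 1) main_str (PySem.Dict.mk memo)).1

-- ===== PORT B =====
-- Source B's successors(s): all strings obtained by removing the first occurrence of one substring
def succsB (substrings : List String) (s : String) : List String :=
  substrings.foldl (fun out sub =>
    let p := PySem.Str.find s sub
    if p ≠ -1 then out ++ [String.ofList (PySem.Chars.slice s.toList none (some p) ++
      PySem.Chars.slice s.toList (some (p + PySem.Str.len sub)) none)]
    else out) []

-- Source B's phase-1 BFS rounds; fuel = len(main_str)+1 bounds the number of rounds (each round's
-- frontier strings are strictly shorter), so fuel never runs out on Pre_ inputs.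
def bfsB (substrings : List String) (memo : PySem.Dict String Int) : Nat → List String → PySem.Set String → List String → List String
  | 0, pending, _, _ => pending
  | Nat.succ f, pending, seen, frontier =>
    if frontier.isEmpty then pending
    else
      let st := frontier.foldl (fun (st : List String × PySem.Set String × List String) s =>
          (succsB substrings s).foldl (fun (st : List String × PySem.Set String × List String) t =>
            if PySem.Dict.contains memo t = false ∧ PySem.Set.contains st.2.1 t = false then
              (st.1 ++ [t], PySem.Set.add st.2.1 t, st.2.2 ++ [t])
            else st) st) (pending, seen, ([] : List String))
      bfsB substrings memo f st.1 st.2.1 st.2.2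

-- Source B's phase-2 bottom-up pass: memo[s] = max([0] + [1 + memo[t] for t in successors(s)]).
-- memo[t] is ported as getD _ t 0: a KeyError is impossible on Pre_ inputs (BFS closure).
def evalB (substrings : List String) (order : List String) (memo : PySem.Dict String Int) : PySem.Dict String Int :=
  order.foldl (fun m s =>
    PySem.Dict.insert m s ((PySem.List.max? ((0 : Int) :: (succsB substrings s).map (fun t => 1 + PySem.Dict.getD m t 0)) (fun v => v)).getD 0)) memo

def calculate_max_removals_alt (main_str : String) (substrings : List String) (memo : List (String × Int)) : Int :=
  let d := PySem.Dict.mk memo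
  match PySem.Dict.get? d main_str with
  | some v => v
  | none =>
    let pending := bfsB substrings d (main_str.toList.length + 1) [main_str] (PySem.Set.ofList [main_str]) [main_str]
    let m2 := evalB substrings (PySem.List.sorted pending (fun t => PySem.Str.len t) false) d
    PySem.Dict.getD m2 main_str 0   -- main_str is always evaluated, so the default 0 is never used

-- ===== PRECONDITION & SPEC =====
-- Pre_ excludes exactly the inputs on which Python A never returns: if '' is one of the
-- substrings and main_str is not already memoized, A recurses on an unchanged string forever
-- (RecursionError).
def Pre_calculate_max_removals (main_str : String) (substrings : List String) (memo : List (String × Int)) : Prop :=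
  main_str ∈ memo.map Prod.fst ∨ "" ∉ substrings
instance (main_str : String) (substrings : List String) (memo : List (String × Int)) : Decidable (Pre_calculate_max_removals main_str substrings memo) := by unfold Pre_calculate_max_removals; infer_instance

def pvWitness_calculate_max_removals : String × List String × (List (String × Int)) := ("abab", ["ab", "ba"], [])

def Spec_calculate_max_removals (main_str : String) (substrings : List String) (memo : List (String × Int)) (out : Int) : Prop := out = calculate_max_removals_alt main_str substrings memo
instance (main_str : String) (substrings : List String) (memo : List (String × Int)) (out : Int) : Decidable (Spec_calculate_max_removals main_str substrings memo out) := by unfold Spec_calculate_max_removals; infer_instance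

-- ===== CLAIM (what is proved, stated in full; the proofs are below) =====
def Claim_equal_calculate_max_removals : Prop := ∀ (main_str : String) (substrings : List String) (memo : List (String × Int)), Dom_calculate_max_removals main_str substrings memo → Pre_calculate_max_removals main_str substrings memo → Spec_calculate_max_removals main_str substrings memo (calculate_max_removals main_str substrings memo)

-- ===== LEMMAS AND PROOFS =====

-- length of a string as Python sees it
def slen (s : String) : Nat := s.toList.length

-- the single-removal expression both Pythons contain (s[:p] + s[p+len(sub):], p = s.find(sub))
def rmv (s sub : String) : String :=
  String.ofList (PySem.Chars.slice s.toList none (some (PySem.Str.find s sub)) ++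
    PySem.Chars.slice s.toList (some (PySem.Str.find s sub + PySem.Str.len sub)) none)

-- the pure value both programs compute: memoized value if pre-seeded, else the recurrence
def specV (subs : List String) (m0 : PySem.Dict String Int) : Nat → String → Int
  | 0, _ => 0
  | Nat.succ f, s =>
    match PySem.Dict.get? m0 s with
    | some v => v
    | none => (succsB subs s).foldl (fun a t => max a (1 + specV subs m0 f t)) 0

def Vt (subs : List String) (m0 : PySem.Dict String Int) (s : String) : Int :=
  specV subs m0 (slen s + 1) s

-- invariant on an evolving memo dict: every entry is either pre-seeded or carries the true value,
-- and pre-seeded entries stay present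
def InvM (subs : List String) (m0 m : PySem.Dict String Int) : Prop :=
  (∀ k v, PySem.Dict.get? m k = some v → Vt subs m0 k = v) ∧
  (∀ k v, PySem.Dict.get? m0 k = some v → PySem.Dict.get? m k = some v)

lemma specV_succ_eq (subs : List String) (m0 : PySem.Dict String Int) (f : Nat) (s : String) :
    specV subs m0 (f + 1) s = (match PySem.Dict.get? m0 s with
      | some v => v
      | none => (succsB subs s).foldl (fun a t => max a (1 + specV subs m0 f t)) 0) := rfl

lemma succsB_eq (subs : List String) (s : String) :
    succsB subs s = (subs.filter (fun sub => decide (PySem.Str.find s sub ≠ -1))).map (rmv s) := by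
  unfold succsB
  exact PySem.List.foldl_append_ite (fun sub => PySem.Str.find s sub ≠ -1) (rmv s) subs []

lemma slen_rmv_lt {s sub : String} (hfind : PySem.Str.find s sub ≠ -1) (hsub : sub ≠ "") :
    slen (rmv s sub) < slen s := by
  have hfe : PySem.Str.find s sub = PySem.Chars.find s.toList sub.toList := PySem.Str.find_eq s sub
  have hne : sub.toList ≠ [] := by
    intro hnil
    apply hsub
    simpa using congrArg String.ofList hnil
  have hpos : sub.toList.length ≥ 1 := by
    cases hl : sub.toList with
    | nil => exact absurd hl hne
    | cons c cs => simp
  rw [hfe] at hfind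
  have h0 : 0 ≤ PySem.Chars.find s.toList sub.toList := by
    have := PySem.Chars.neg_one_le_find s.toList sub.toList
    omega
  have hspec := (PySem.Chars.find_spec h0).1
  have hlen : sub.toList.length ≤ s.toList.length - (PySem.Chars.find s.toList sub.toList).toNat := by
    have := hspec.length_le
    simpa using this
  have hle : (PySem.Chars.find s.toList sub.toList).toNat ≤ s.toList.length := by omega
  have h0' : (0 : Int) ≤ PySem.Chars.find s.toList sub.toList + PySem.Str.len sub := by
    rw [PySem.Str.len_eq]; omega
  unfold slen rmv
  rw [hfe, String.toList_ofList, List.length_append, PySem.Chars.slice_eq_listSlice,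
    PySem.Chars.slice_eq_listSlice, PySem.List.slice_to _ h0, PySem.List.slice_from _ h0',
    List.length_take, List.length_drop, PySem.Str.len_eq]
  omega

lemma slen_lt_of_mem_succsB {subs : List String} (hsub : "" ∉ subs) {s t : String}
    (ht : t ∈ succsB subs s) : slen t < slen s := by
  rw [succsB_eq] at ht
  obtain ⟨sub, hmem, rfl⟩ := List.mem_map.mp ht
  obtain ⟨hmem', hfind⟩ := List.mem_filter.mp hmem
  have hfind' : PySem.Str.find s sub ≠ -1 := of_decide_eq_true hfind
  have hne : sub ≠ "" := fun h => hsub (h ▸ hmem')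
  exact slen_rmv_lt hfind' hne

lemma specV_congr_fuel {subs : List String} {m0 : PySem.Dict String Int} (hsub : "" ∉ subs) :
    ∀ (n : Nat) (s : String) (f g : Nat), slen s ≤ n → slen s < f → slen s < g →
      specV subs m0 f s = specV subs m0 g s := by
  intro n
  induction n with
  | zero =>
    intro s f g hn hf hg
    obtain ⟨f', rfl⟩ : ∃ f', f = f' + 1 := ⟨f - 1, by omega⟩
    obtain ⟨g', rfl⟩ : ∃ g', g = g' + 1 := ⟨g - 1, by omega⟩
    rw [specV_succ_eq, specV_succ_eq]
    cases h : PySem.Dict.get? m0 s with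
    | some v => rfl
    | none =>
      change (succsB subs s).foldl (fun a t => max a (1 + specV subs m0 f' t)) 0
        = (succsB subs s).foldl (fun a t => max a (1 + specV subs m0 g' t)) 0
      apply PySem.List.foldl_congr_mem
      intro a t htm
      exact absurd (slen_lt_of_mem_succsB hsub htm) (by omega)
  | succ n ihn =>
    intro s f g hn hf hg
    obtain ⟨f', rfl⟩ : ∃ f', f = f' + 1 := ⟨f - 1, by omega⟩
    obtain ⟨g', rfl⟩ : ∃ g', g = g' + 1 := ⟨g - 1, by omega⟩
    rw [specV_succ_eq, specV_succ_eq]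
    cases h : PySem.Dict.get? m0 s with
    | some v => rfl
    | none =>
      change (succsB subs s).foldl (fun a t => max a (1 + specV subs m0 f' t)) 0
        = (succsB subs s).foldl (fun a t => max a (1 + specV subs m0 g' t)) 0
      apply PySem.List.foldl_congr_mem
      intro a t htm
      have hlt := slen_lt_of_mem_succsB hsub htm
      rw [ihn t f' g' (by omega) (by omega) (by omega)]

lemma Vt_of_some {subs : List String} {m0 : PySem.Dict String Int} {s : String} {v : Int}
    (h : PySem.Dict.get? m0 s = some v) : Vt subs m0 s = v := by
  unfold Vt
  rw [specV_succ_eq, h]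

lemma Vt_of_none {subs : List String} {m0 : PySem.Dict String Int} (hsub : "" ∉ subs) {s : String}
    (h : PySem.Dict.get? m0 s = none) :
    Vt subs m0 s = (succsB subs s).foldl (fun a t => max a (1 + Vt subs m0 t)) 0 := by
  unfold Vt
  rw [specV_succ_eq, h]
  change (succsB subs s).foldl (fun a t => max a (1 + specV subs m0 (slen s) t)) 0 = _
  apply PySem.List.foldl_congr_mem
  intro a t htm
  have hlt := slen_lt_of_mem_succsB hsub htm
  rw [specV_congr_fuel hsub (slen t) t (slen s) (slen t + 1) le_rfl (by omega) (by omega)]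

lemma InvM_insert {subs : List String} {m0 m : PySem.Dict String Int} {s : String}
    (hm : InvM subs m0 m) (h0 : PySem.Dict.get? m0 s = none) :
    InvM subs m0 (PySem.Dict.insert m s (Vt subs m0 s)) := by
  constructor
  · intro k v h
    rw [PySem.Dict.get?_insert] at h
    by_cases hk : k = s
    · subst hk
      simp at h
      exact h
    · rw [if_neg hk] at h
      exact hm.1 k v h
  · intro k v h
    have hk : k ≠ s := by
      rintro rfl
      rw [h0] at h
      cases h
    rw [PySem.Dict.get?_insert, if_neg hk]
    exact hm.2 k v h

-- proof-side name for A's loop body (definitionally the lambda inside calcA)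
def Astep (subs : List String) (f : Nat) (s : String) (st : Int × PySem.Dict String Int) (substring : String) : Int × PySem.Dict String Int :=
  let pos := PySem.Str.find s substring
  if pos ≠ -1 then
    let modified_str := String.ofList (PySem.Chars.slice s.toList none (some pos) ++
      PySem.Chars.slice s.toList (some (pos + PySem.Str.len substring)) none)
    let r := calcA subs f modified_str st.2
    (max st.1 (1 + r.1), r.2)
  else st

lemma calcA_succ_eq (subs : List String) (f : Nat) (s : String) (m : PySem.Dict String Int) :
    calcA subs (f + 1) s m = (match PySem.Dict.get? m s with
      | some v => (v, m)
      | none =>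
        let st := subs.foldl (Astep subs f s) (0, m)
        (st.1, PySem.Dict.insert st.2 s st.1)) := rfl

lemma Astep_eq (subs : List String) (f : Nat) (s : String) (st : Int × PySem.Dict String Int) (sub : String) :
    Astep subs f s st sub = (if PySem.Str.find s sub ≠ -1 then
      (max st.1 (1 + (calcA subs f (rmv s sub) st.2).1), (calcA subs f (rmv s sub) st.2).2)
    else st) := rfl

lemma calcA_fold {subs : List String} {m0 : PySem.Dict String Int} (hsub : "" ∉ subs)
    (f : Nat) (s : String)
    (hIH : ∀ (t : String) (m : PySem.Dict String Int), slen t < f → InvM subs m0 m →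
      (calcA subs f t m).1 = Vt subs m0 t ∧ InvM subs m0 (calcA subs f t m).2) :
    ∀ (l : List String), (∀ x ∈ l, x ∈ subs) → ∀ (a : Int) (m' : PySem.Dict String Int),
      InvM subs m0 m' → slen s ≤ f →
      (l.foldl (Astep subs f s) (a, m')).1
          = l.foldl (fun a sub => if PySem.Str.find s sub ≠ -1 then max a (1 + Vt subs m0 (rmv s sub)) else a) a
        ∧ InvM subs m0 (l.foldl (Astep subs f s) (a, m')).2 := by
  intro l
  induction l with
  | nil => intro _ a m' hm' _; exact ⟨rfl, hm'⟩
  | cons sub l ihl =>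
    intro hmem a m' hm' hsf
    simp only [List.foldl_cons, Astep_eq]
    by_cases hf : PySem.Str.find s sub ≠ -1
    · rw [if_pos hf, if_pos hf]
      have hne : sub ≠ "" := fun h => hsub (h ▸ hmem sub (by simp))
      have hlt : slen (rmv s sub) < f := by
        have := slen_rmv_lt hf hne
        omega
      obtain ⟨hv, hin⟩ := hIH (rmv s sub) m' hlt hm'
      rw [hv]
      exact ihl (fun x hx => hmem x (by simp [hx])) _ _ hin hsf
    · rw [if_neg hf, if_neg hf]
      exact ihl (fun x hx => hmem x (by simp [hx])) _ _ hm' hsf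

lemma calcA_correct {subs : List String} {m0 : PySem.Dict String Int} (hsub : "" ∉ subs) :
    ∀ (f : Nat) (s : String) (m : PySem.Dict String Int), slen s < f → InvM subs m0 m →
      (calcA subs f s m).1 = Vt subs m0 s ∧ InvM subs m0 (calcA subs f s m).2 := by
  intro f
  induction f with
  | zero => intro s m hs hm; omega
  | succ f ih =>
    intro s m hs hm
    rw [calcA_succ_eq]
    cases hms : PySem.Dict.get? m s with
    | some v => exact ⟨(hm.1 s v hms).symm, hm⟩
    | none =>
      have h0 : PySem.Dict.get? m0 s = none := by
        cases hh : PySem.Dict.get? m0 s with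
        | none => rfl
        | some v =>
          have h2 := hm.2 s v hh
          rw [hms] at h2
          cases h2
      obtain ⟨hv, hin⟩ := calcA_fold hsub f s ih subs (fun _ h => h) 0 m hm (by omega)
      have hval : (subs.foldl (Astep subs f s) (0, m)).1 = Vt subs m0 s := by
        rw [hv, Vt_of_none hsub h0, succsB_eq, List.foldl_map,
          PySem.List.foldl_ite_eq_foldl_filter (fun sub => PySem.Str.find s sub ≠ -1)
            (fun a sub => max a (1 + Vt subs m0 (rmv s sub)))]
      constructor
      · show (subs.foldl (Astep subs f s) (0, m)).1 = Vt subs m0 s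
        exact hval
      · show InvM subs m0 (PySem.Dict.insert (subs.foldl (Astep subs f s) (0, m)).2 s
          (subs.foldl (Astep subs f s) (0, m)).1)
        rw [hval]
        exact InvM_insert hin h0

-- proof-side name for B's BFS inner loop body (definitionally the lambda inside bfsB)
def Bstep (m0 : PySem.Dict String Int) (st : List String × PySem.Set String × List String) (t : String) : List String × PySem.Set String × List String :=
  if PySem.Dict.contains m0 t = false ∧ PySem.Set.contains st.2.1 t = false then
    (st.1 ++ [t], PySem.Set.add st.2.1 t, st.2.2 ++ [t])
  else st

lemma bfsB_succ_eq (subs : List String) (m0 : PySem.Dict String Int) (f : Nat)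
    (pending : List String) (seen : PySem.Set String) (frontier : List String) :
    bfsB subs m0 (f + 1) pending seen frontier = (if frontier.isEmpty then pending else
      bfsB subs m0 f
        (frontier.foldl (fun st s => (succsB subs s).foldl (Bstep m0) st) (pending, seen, ([] : List String))).1
        (frontier.foldl (fun st s => (succsB subs s).foldl (Bstep m0) st) (pending, seen, ([] : List String))).2.1
        (frontier.foldl (fun st s => (succsB subs s).foldl (Bstep m0) st) (pending, seen, ([] : List String))).2.2) := rfl

lemma bfs_inner (m0 : PySem.Dict String Int) :
    ∀ (ts : List String) (st : List String × PySem.Set String × List String),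
      st.2.1 = st.1 → (∀ u ∈ st.2.2, u ∈ st.1) →
      ((ts.foldl (Bstep m0) st).2.1 = (ts.foldl (Bstep m0) st).1) ∧
      (∀ u ∈ st.1, u ∈ (ts.foldl (Bstep m0) st).1) ∧
      (∀ u ∈ st.2.2, u ∈ (ts.foldl (Bstep m0) st).2.2) ∧
      (∀ u ∈ (ts.foldl (Bstep m0) st).1, u ∈ st.1 ∨ (u ∈ ts ∧ PySem.Dict.contains m0 u = false)) ∧
      (∀ u ∈ (ts.foldl (Bstep m0) st).2.2, u ∈ st.2.2 ∨ (u ∈ ts ∧ PySem.Dict.contains m0 u = false)) ∧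
      (∀ u ∈ (ts.foldl (Bstep m0) st).2.2, u ∈ (ts.foldl (Bstep m0) st).1) ∧
      (∀ t ∈ ts, PySem.Dict.contains m0 t = false → t ∈ (ts.foldl (Bstep m0) st).1) ∧
      (∀ u ∈ (ts.foldl (Bstep m0) st).1, u ∈ st.1 ∨ u ∈ (ts.foldl (Bstep m0) st).2.2) := by
  intro ts
  induction ts with
  | nil =>
    intro st hst hnx
    refine ⟨hst, fun u hu => hu, fun u hu => hu, fun u hu => Or.inl hu, fun u hu => Or.inl hu,
      hnx, fun t ht => absurd ht (by simp), fun u hu => Or.inl hu⟩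
  | cons t ts ihl =>
    intro st hst hnx
    by_cases hc : PySem.Dict.contains m0 t = false ∧ PySem.Set.contains st.2.1 t = false
    · have hnotmem : t ∉ st.2.1 := by
        have := hc.2
        simp only [PySem.Set.contains_eq_listContains] at this
        simpa using this
      have hB : Bstep m0 st t = (st.1 ++ [t], st.1 ++ [t], st.2.2 ++ [t]) := by
        unfold Bstep
        rw [if_pos hc, PySem.Set.add_of_not_mem hnotmem, hst]
      simp only [List.foldl_cons, hB]
      obtain ⟨c1, c2, c3, c4, c5, c6, c7, c8⟩ := ihl (st.1 ++ [t], st.1 ++ [t], st.2.2 ++ [t]) rfl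
        (by
          intro u hu
          rcases List.mem_append.mp hu with h | h
          · exact List.mem_append_left _ (hnx u h)
          · exact List.mem_append_right _ h)
      refine ⟨c1, ?_, ?_, ?_, ?_, c6, ?_, ?_⟩
      · intro u hu; exact c2 u (List.mem_append_left _ hu)
      · intro u hu; exact c3 u (List.mem_append_left _ hu)
      · intro u hu
        rcases c4 u hu with h | h
        · rcases List.mem_append.mp h with h' | h'
          · exact Or.inl h'
          · refine Or.inr ⟨by simp at h'; simp [h'], ?_⟩
            have : u = t := by simpa using h'
            rw [this]; exact hc.1
        · exact Or.inr ⟨by simp [h.1], h.2⟩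
      · intro u hu
        rcases c5 u hu with h | h
        · rcases List.mem_append.mp h with h' | h'
          · exact Or.inl h'
          · refine Or.inr ⟨by simp at h'; simp [h'], ?_⟩
            have : u = t := by simpa using h'
            rw [this]; exact hc.1
        · exact Or.inr ⟨by simp [h.1], h.2⟩
      · intro x hx hcont
        rcases List.mem_cons.mp hx with rfl | hx'
        · exact c2 x (List.mem_append_right _ (by simp))
        · exact c7 x hx' hcont
      · intro u hu
        rcases c8 u hu with h | h
        · rcases List.mem_append.mp h with h' | h'
          · exact Or.inl h'
          · have : u = t := by simpa using h'
            subst this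
            exact Or.inr (c3 u (List.mem_append_right _ (by simp)))
        · exact Or.inr h
    · have hB : Bstep m0 st t = st := by
        unfold Bstep
        rw [if_neg hc]
      simp only [List.foldl_cons, hB]
      obtain ⟨c1, c2, c3, c4, c5, c6, c7, c8⟩ := ihl st hst hnx
      refine ⟨c1, c2, c3, ?_, ?_, c6, ?_, c8⟩
      · intro u hu
        rcases c4 u hu with h | h
        · exact Or.inl h
        · exact Or.inr ⟨by simp [h.1], h.2⟩
      · intro u hu
        rcases c5 u hu with h | h
        · exact Or.inl h
        · exact Or.inr ⟨by simp [h.1], h.2⟩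
      · intro x hx hcont
        rcases List.mem_cons.mp hx with rfl | hx'
        · have hb : PySem.Set.contains st.2.1 x = true := by
            cases hx2 : PySem.Set.contains st.2.1 x with
            | false => exact absurd ⟨hcont, hx2⟩ hc
            | true => rfl
          have hmem : x ∈ st.2.1 := by
            simp only [PySem.Set.contains_eq_listContains] at hb
            simpa using hb
          rw [hst] at hmem
          exact c2 x hmem
        · exact c7 x hx' hcont

lemma bfs_round {subs : List String} (m0 : PySem.Dict String Int) :
    ∀ (fr : List String) (st : List String × PySem.Set String × List String),
      st.2.1 = st.1 → (∀ u ∈ st.2.2, u ∈ st.1) →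
      (((fr.foldl (fun st s => (succsB subs s).foldl (Bstep m0) st) st).2.1 = (fr.foldl (fun st s => (succsB subs s).foldl (Bstep m0) st) st).1) ∧
      (∀ u ∈ st.1, u ∈ (fr.foldl (fun st s => (succsB subs s).foldl (Bstep m0) st) st).1) ∧
      (∀ u ∈ st.2.2, u ∈ (fr.foldl (fun st s => (succsB subs s).foldl (Bstep m0) st) st).2.2) ∧
      (∀ u ∈ (fr.foldl (fun st s => (succsB subs s).foldl (Bstep m0) st) st).1, u ∈ st.1 ∨ ((∃ x ∈ fr, u ∈ succsB subs x) ∧ PySem.Dict.contains m0 u = false)) ∧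
      (∀ u ∈ (fr.foldl (fun st s => (succsB subs s).foldl (Bstep m0) st) st).2.2, u ∈ st.2.2 ∨ ((∃ x ∈ fr, u ∈ succsB subs x) ∧ PySem.Dict.contains m0 u = false)) ∧
      (∀ u ∈ (fr.foldl (fun st s => (succsB subs s).foldl (Bstep m0) st) st).2.2, u ∈ (fr.foldl (fun st s => (succsB subs s).foldl (Bstep m0) st) st).1) ∧
      (∀ x ∈ fr, ∀ t ∈ succsB subs x, PySem.Dict.contains m0 t = false → t ∈ (fr.foldl (fun st s => (succsB subs s).foldl (Bstep m0) st) st).1) ∧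
      (∀ u ∈ (fr.foldl (fun st s => (succsB subs s).foldl (Bstep m0) st) st).1, u ∈ st.1 ∨ u ∈ (fr.foldl (fun st s => (succsB subs s).foldl (Bstep m0) st) st).2.2)) := by
  intro fr
  induction fr with
  | nil =>
    intro st hst hnx
    exact ⟨hst, fun u hu => hu, fun u hu => hu, fun u hu => Or.inl hu, fun u hu => Or.inl hu,
      hnx, fun x hx => absurd hx (by simp), fun u hu => Or.inl hu⟩
  | cons x fr ihl =>
    intro st hst hnx
    simp only [List.foldl_cons]
    obtain ⟨i1, i2, i3, i4, i5, i6, i7, i8⟩ := bfs_inner m0 (succsB subs x) st hst hnx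
    obtain ⟨c1, c2, c3, c4, c5, c6, c7, c8⟩ := ihl ((succsB subs x).foldl (Bstep m0) st) i1 i6
    refine ⟨c1, ?_, ?_, ?_, ?_, c6, ?_, ?_⟩
    · intro u hu; exact c2 u (i2 u hu)
    · intro u hu; exact c3 u (i3 u hu)
    · intro u hu
      rcases c4 u hu with h | h
      · rcases i4 u h with h' | h'
        · exact Or.inl h'
        · exact Or.inr ⟨⟨x, by simp, h'.1⟩, h'.2⟩
      · exact Or.inr ⟨⟨h.1.choose, by have := h.1.choose_spec; simp [this.1], h.1.choose_spec.2⟩, h.2⟩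
    · intro u hu
      rcases c5 u hu with h | h
      · rcases i5 u h with h' | h'
        · exact Or.inl h'
        · exact Or.inr ⟨⟨x, by simp, h'.1⟩, h'.2⟩
      · exact Or.inr ⟨⟨h.1.choose, by have := h.1.choose_spec; simp [this.1], h.1.choose_spec.2⟩, h.2⟩
    · intro y hy t ht hcont
      rcases List.mem_cons.mp hy with rfl | hy'
      · exact c2 t (i7 t ht hcont)
      · exact c7 y hy' t ht hcont
    · intro u hu
      rcases c8 u hu with h | h
      · rcases i8 u h with h' | h'
        · exact Or.inl h'
        · exact Or.inr (c3 u h')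
      · exact Or.inr h

lemma bfs_correct {subs : List String} {m0 : PySem.Dict String Int} (hsub : "" ∉ subs) :
    ∀ (fuel : Nat) (pending : List String) (frontier : List String),
      (∀ x ∈ frontier, slen x < fuel) → (∀ x ∈ frontier, x ∈ pending) →
      (∀ x ∈ pending, PySem.Dict.contains m0 x = false) →
      (∀ x ∈ pending, x ∉ frontier → ∀ t ∈ succsB subs x, PySem.Dict.contains m0 t = false → t ∈ pending) →
      (∀ x ∈ bfsB subs m0 fuel pending pending frontier, PySem.Dict.contains m0 x = false) ∧
      (∀ u ∈ pending, u ∈ bfsB subs m0 fuel pending pending frontier) ∧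
      (∀ x ∈ bfsB subs m0 fuel pending pending frontier, ∀ t ∈ succsB subs x,
        PySem.Dict.contains m0 t = false → t ∈ bfsB subs m0 fuel pending pending frontier) := by
  intro fuel
  induction fuel with
  | zero =>
    intro pending frontier h1 h2 h3 h4
    have hfr : frontier = [] := by
      cases frontier with
      | nil => rfl
      | cons a l => exact absurd (h1 a (by simp)) (by omega)
    subst hfr
    exact ⟨h3, fun u hu => hu, fun x hx t ht hc => h4 x hx (by simp) t ht hc⟩
  | succ fuel ih =>
    intro pending frontier h1 h2 h3 h4
    rw [bfsB_succ_eq]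
    by_cases hfr : frontier.isEmpty
    · rw [if_pos hfr]
      have hfr' : frontier = [] := List.isEmpty_iff.mp hfr
      subst hfr'
      exact ⟨h3, fun u hu => hu, fun x hx t ht hc => h4 x hx (by simp) t ht hc⟩
    · rw [if_neg hfr]
      obtain ⟨c1, c2, c3, c4, c5, c6, c7, c8⟩ := bfs_round (subs := subs) m0 frontier
        (pending, pending, ([] : List String)) rfl (by intro u hu; cases hu)
      set st := frontier.foldl (fun st s => (succsB subs s).foldl (Bstep m0) st)
        (pending, pending, ([] : List String)) with hstdef
      rw [c1]
      have hh1 : ∀ x ∈ st.2.2, slen x < fuel := by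
        intro x hx
        rcases c5 x hx with h | h
        · cases h
        · obtain ⟨⟨y, hy, hxy⟩, _⟩ := h
          have hl1 := slen_lt_of_mem_succsB hsub hxy
          have hl2 := h1 y hy
          omega
      have hh3 : ∀ x ∈ st.1, PySem.Dict.contains m0 x = false := by
        intro x hx
        rcases c4 x hx with h | h
        · exact h3 x h
        · exact h.2
      have hh4 : ∀ x ∈ st.1, x ∉ st.2.2 → ∀ t ∈ succsB subs x, PySem.Dict.contains m0 t = false → t ∈ st.1 := by
        intro x hx hnx t ht hc
        rcases c8 x hx with h | h
        · by_cases hxf : x ∈ frontier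
          · exact c7 x hxf t ht hc
          · exact c2 t (h4 x h hxf t ht hc)
        · exact absurd h hnx
      obtain ⟨g1, g2, g3⟩ := ih st.1 st.2.2 hh1 c6 hh3 hh4
      exact ⟨g1, fun u hu => g2 u (c2 u hu), g3⟩

lemma eval_correct {subs : List String} {m0 : PySem.Dict String Int} (hsub : "" ∉ subs)
    (pending : List String)
    (hgood : ∀ x ∈ pending, PySem.Dict.contains m0 x = false)
    (hclosed : ∀ x ∈ pending, ∀ t ∈ succsB subs x, PySem.Dict.contains m0 t = false → t ∈ pending) :
    ∀ (rest : List String) (m : PySem.Dict String Int),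
      (∀ x ∈ rest, x ∈ pending) → List.Pairwise (fun a b => slen a ≤ slen b) rest →
      InvM subs m0 m → (∀ k ∈ pending, k ∉ rest → (PySem.Dict.get? m k).isSome) →
      InvM subs m0 (evalB subs rest m) ∧ ∀ k ∈ pending, (PySem.Dict.get? (evalB subs rest m) k).isSome := by
  intro rest
  induction rest with
  | nil =>
    intro m hr hpw hm hdone
    exact ⟨hm, fun k hk => hdone k hk (by simp)⟩
  | cons s rest ihl =>
    intro m hr hpw hm hdone
    have hsP : s ∈ pending := hr s (by simp)
    have h0s : PySem.Dict.get? m0 s = none :=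
      (PySem.Dict.get?_eq_none_iff_contains m0 s).mpr (hgood s hsP)
    have hpw' := List.pairwise_cons.mp hpw
    have hval : ((PySem.List.max? ((0 : Int) :: (succsB subs s).map (fun t => 1 + PySem.Dict.getD m t 0)) (fun v => v)).getD 0) = Vt subs m0 s := by
      rw [PySem.List.max?_id_cons, Option.getD_some, List.foldl_map, Vt_of_none hsub h0s]
      apply PySem.List.foldl_congr_mem
      intro a t htm
      have hgd : PySem.Dict.getD m t 0 = Vt subs m0 t := by
        by_cases hct : PySem.Dict.contains m0 t = false
        · have htP : t ∈ pending := hclosed s hsP t htm hct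
          have hlt : slen t < slen s := slen_lt_of_mem_succsB hsub htm
          have htnotin : t ∉ s :: rest := by
            intro hin
            rcases List.mem_cons.mp hin with rfl | hin'
            · omega
            · exact absurd (hpw'.1 t hin') (by omega)
          obtain ⟨v, hv⟩ := Option.isSome_iff_exists.mp (hdone t htP htnotin)
          rw [PySem.Dict.getD_eq_get?_getD, hv, Option.getD_some]
          exact (hm.1 t v hv).symm
        · have hct' : PySem.Dict.contains m0 t = true := by
            cases hx : PySem.Dict.contains m0 t with
            | false => exact absurd hx hct
            | true => rfl
          have hsome : (PySem.Dict.get? m0 t).isSome := by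
            rw [← PySem.Dict.contains_eq_isSome_get?]
            exact hct'
          obtain ⟨v, hv0⟩ := Option.isSome_iff_exists.mp hsome
          have hvm := hm.2 t v hv0
          rw [PySem.Dict.getD_eq_get?_getD, hvm, Option.getD_some]
          exact (Vt_of_some hv0).symm
      rw [hgd]
    have hstep : evalB subs (s :: rest) m = evalB subs rest (PySem.Dict.insert m s (Vt subs m0 s)) := by
      rw [← hval]
      rfl
    rw [hstep]
    apply ihl (PySem.Dict.insert m s (Vt subs m0 s))
      (fun x hx => hr x (by simp [hx])) hpw'.2 (InvM_insert hm h0s)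
    intro k hk hknot
    by_cases hks : k = s
    · subst hks
      rw [PySem.Dict.get?_insert]
      simp
    · rw [PySem.Dict.get?_insert, if_neg hks]
      exact hdone k hk (by
        intro hin
        rcases List.mem_cons.mp hin with h | h
        · exact hks h
        · exact hknot h)

lemma alt_correct {subs : List String} {main_str : String} {m0 : PySem.Dict String Int}
    (hsub : "" ∉ subs) (h0 : PySem.Dict.get? m0 main_str = none) :
    PySem.Dict.getD (evalB subs (PySem.List.sorted
        (bfsB subs m0 (main_str.toList.length + 1) [main_str] [main_str] [main_str])
        (fun t => PySem.Str.len t) false) m0) main_str 0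
      = Vt subs m0 main_str := by
  have hcont0 : PySem.Dict.contains m0 main_str = false :=
    (PySem.Dict.get?_eq_none_iff_contains m0 main_str).mp h0
  obtain ⟨g1, g2, g3⟩ := bfs_correct hsub (main_str.toList.length + 1) [main_str] [main_str]
    (by
      intro x hx
      have hx' : x = main_str := by simpa using hx
      subst hx'
      unfold slen
      omega)
    (fun x hx => hx)
    (by
      intro x hx
      have hx' : x = main_str := by simpa using hx
      subst hx'
      exact hcont0)
    (by
      intro x hx hnx
      exact absurd hx hnx)
  set P := bfsB subs m0 (main_str.toList.length + 1) [main_str] [main_str] [main_str] with hP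
  have hmainP : main_str ∈ P := g2 main_str (by simp)
  have hpair : List.Pairwise (fun a b => slen a ≤ slen b)
      (PySem.List.sorted P (fun t => PySem.Str.len t) false) := by
    have h := PySem.List.sorted_pairwise P (fun t => PySem.Str.len t)
    refine h.imp ?_
    intro a b hab
    simp only [PySem.Str.len_eq] at hab
    unfold slen
    exact_mod_cast hab
  have hperm := PySem.List.sorted_perm P (fun t => PySem.Str.len t) false
  obtain ⟨hInv, hAll⟩ := eval_correct hsub P g1 g3
    (PySem.List.sorted P (fun t => PySem.Str.len t) false) m0
    (fun x hx => hperm.mem_iff.mp hx)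
    hpair
    ⟨fun k v h => Vt_of_some h, fun k v h => h⟩
    (fun k hk hknot => absurd (hperm.mem_iff.mpr hk) hknot)
  obtain ⟨v, hv⟩ := Option.isSome_iff_exists.mp (hAll main_str hmainP)
  rw [PySem.Dict.getD_eq_get?_getD, hv, Option.getD_some]
  exact (hInv.1 main_str v hv).symm

-- ===== VERDICT (by name: the statement is the Claim_ definition above) =====
theorem calculate_max_removals_spec : Claim_equal_calculate_max_removals := by
  intro main_str substrings memo _hdom hpre
  unfold Spec_calculate_max_removals calculate_max_removals calculate_max_removals_alt
  cases hm : PySem.Dict.get? (PySem.Dict.mk memo) main_str with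
  | some v => simp only [calcA_succ_eq, hm]
  | none =>
    have hsub : "" ∉ substrings := by
      rcases hpre with h | h
      · exfalso
        have hcf : PySem.Dict.contains (PySem.Dict.mk memo) main_str = false :=
          (PySem.Dict.get?_eq_none_iff_contains _ _).mp hm
        have hct : PySem.Dict.contains (PySem.Dict.mk memo) main_str = true := by
          rw [PySem.Dict.contains_iff_mem_keys]
          simpa [PySem.Dict.keys_mk] using h
        rw [hcf] at hct
        cases hct
      · exact h
    have hInv0 : InvM substrings (PySem.Dict.mk memo) (PySem.Dict.mk memo) :=
      ⟨fun k v h => Vt_of_some h, fun _ _ h => h⟩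
    have hA := (calcA_correct hsub (main_str.toList.length + 1) main_str (PySem.Dict.mk memo)
      (by unfold slen; omega) hInv0).1
    have hofl : (PySem.Set.ofList [main_str] : PySem.Set String) = [main_str] := rfl
    simp only [hm, hofl]
    rw [hA]
    exact (alt_correct hsub hm).symm
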